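-- pv_equiv track=rewrite | github.com/JOBEBOLDER/leetcode_solutions | python/google_prep/7.py | sums_of_two_squares_exactly_two_ways
-- ===== SOURCE A (Python) =====
-- import math
-- from collections import defaultdict
-- from typing import List
--
-- def sums_of_two_squares_exactly_two_ways(n: int) -> List[int]:
--     """
--     Return all s < n such that s = a^2 + b^2 in exactly two distinct unordered ways,
--     where a, b are non-negative integers and (a,b) and (b,a) are considered the same.
--     """
--     if n <= 1:
--         return []
--
--     m = math.isqrt(n - 1)  # max possible a (and b) such that a^2 < n
--     count = defaultdict(int)  # sum -> number of (a,b) pairs with a<=b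
--
--     for a in range(m + 1):
--         a2 = a * a
--         max_b = math.isqrt(n - 1 - a2)  # ensure a^2 + b^2 < n
--         for b in range(a, max_b + 1):   # b starts at a to avoid counting (b,a)
--             s = a2 + b * b
--             count[s] += 1
--
--     res = [s for s, c in count.items() if c == 2]
--     res.sort()
--     return res
-- ===== SOURCE B (Python) =====
-- import math
--
-- def sums_of_two_squares_exactly_two_ways(n: int):
--     # Sort-then-scan: flatten all pair sums a^2+b^2 (a <= b, sum < n) into one
--     # multiset, sort it, and run-length-scan consecutive runs, emitting the sums
--     # whose run has length exactly 2.  No counter structure is ever built and the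
--     # output comes out of the scan already in ascending order.
--     if n <= 0:
--         return []
--     m = math.isqrt(n - 1)
--     sums = sorted(a * a + b * b
--                   for a in range(m + 1)
--                   for b in range(a, m + 1)
--                   if a * a + b * b < n)
--     res = []
--     run_val = None
--     run_len = 0
--     for x in sums:
--         if x == run_val:
--             run_len += 1
--         else:
--             if run_len == 2:
--                 res.append(run_val)
--             run_val = x
--             run_len = 1
--     if run_len == 2:
--         res.append(run_val)
--     return res
-- ===== Notes on version B (the rewrite author's own statement) =====
-- stated objective: alternative
-- what changed: B replaces A's keyed aggregation (defaultdict counter over pair sums, filter of items, final sort of the keys) by sort-then-scan: it flattens all pair sums into one multiset, sorts it, and a single run-length scan over the sorted list emits each sum whose run has length exactly 2, so no counter/dict is ever built and the output falls out of the scan already in ascending order.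
import Mathlib
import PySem

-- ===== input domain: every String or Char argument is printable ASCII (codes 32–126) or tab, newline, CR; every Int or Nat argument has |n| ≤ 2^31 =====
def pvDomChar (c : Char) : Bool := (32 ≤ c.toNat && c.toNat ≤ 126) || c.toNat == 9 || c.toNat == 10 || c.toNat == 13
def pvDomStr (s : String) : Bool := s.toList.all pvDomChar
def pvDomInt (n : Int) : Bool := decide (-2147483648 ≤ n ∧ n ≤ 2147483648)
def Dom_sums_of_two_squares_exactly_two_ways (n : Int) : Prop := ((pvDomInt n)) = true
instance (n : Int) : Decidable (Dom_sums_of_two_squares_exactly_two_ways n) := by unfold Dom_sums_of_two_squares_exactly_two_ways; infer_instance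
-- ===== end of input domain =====

-- B replaces A's defaultdict counting + key sort by sort-then-scan: the flat multiset of
-- pair sums is sorted once and a run-length scan emits the sums occurring exactly twice.


-- math.isqrt, exact for x ≥ 0 (both programs only ever apply it to non-negative arguments)
def pyIsqrt (x : Int) : Int := (Nat.sqrt x.toNat : Int)

-- ===== PORT A =====
def sums_of_two_squares_exactly_two_ways (n : Int) : List Int :=
  if n ≤ 1 then []
  else
    let m : Int := pyIsqrt (n - 1)
    let count : PySem.Dict Int Int :=
      (PySem.List.pyRange 0 (m + 1) 1).foldl (fun d a =>
        let a2 := a * a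
        let maxB : Int := pyIsqrt (n - 1 - a2)
        (PySem.List.pyRange a (maxB + 1) 1).foldl (fun d b =>
          d.modify (a2 + b * b) 0 (· + 1)) d) PySem.Dict.empty
    let res : List Int := (count.items.filter (fun p => p.2 == 2)).map (·.1)
    PySem.List.sorted res (fun x => x) false

-- ===== PORT B =====
-- one step of Source B's run-length scan; the state is (res, run_val, run_len).
-- run_val = none is Python's run_val = None ('x == None' is False); when run_len == 2 the
-- run_val is always some v, so '.getD 0' (the append of run_val) is exact there.
def pvStep (st : List Int × Option Int × Int) (x : Int) : List Int × Option Int × Int :=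
  if some x == st.2.1 then (st.1, st.2.1, st.2.2 + 1)
  else ((if st.2.2 == 2 then st.1 ++ [st.2.1.getD 0] else st.1), some x, 1)

def sums_of_two_squares_exactly_two_ways_alt (n : Int) : List Int :=
  if n ≤ 0 then []
  else
    let m : Int := pyIsqrt (n - 1)
    let sums : List Int :=
      PySem.List.sorted
        ((PySem.List.pyRange 0 (m + 1) 1).flatMap (fun a =>
          ((PySem.List.pyRange a (m + 1) 1).filter (fun b => decide (a * a + b * b < n))).map
            (fun b => a * a + b * b)))
        (fun x => x) false
    let st := sums.foldl pvStep ([], none, 0)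
    if st.2.2 == 2 then st.1 ++ [st.2.1.getD 0] else st.1

-- ===== PRECONDITION & SPEC =====
def Spec_sums_of_two_squares_exactly_two_ways (n : Int) (out : List Int) : Prop := out = sums_of_two_squares_exactly_two_ways_alt n
instance (n : Int) (out : List Int) : Decidable (Spec_sums_of_two_squares_exactly_two_ways n out) := by unfold Spec_sums_of_two_squares_exactly_two_ways; infer_instance

-- ===== CLAIM (what is proved, stated in full; the proofs are below) =====
def Claim_equal_sums_of_two_squares_exactly_two_ways : Prop := ∀ (n : Int), Dom_sums_of_two_squares_exactly_two_ways n → Spec_sums_of_two_squares_exactly_two_ways n (sums_of_two_squares_exactly_two_ways n)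

-- ===== LEMMAS AND PROOFS =====

-- the multiset of sums a²+b², 0 ≤ a ≤ b, a²+b² < n, exactly as A enumerates it
def pvSums (n : Int) : List Int :=
  (PySem.List.pyRange 0 (pyIsqrt (n - 1) + 1) 1).flatMap (fun a =>
    (PySem.List.pyRange a (pyIsqrt (n - 1 - a * a) + 1) 1).map (fun b => a * a + b * b))

-- the same multiset as B enumerates it (guard a²+b² < n instead of a per-a isqrt bound)
def pvSumsB (n : Int) : List Int :=
  (PySem.List.pyRange 0 (pyIsqrt (n - 1) + 1) 1).flatMap (fun a =>
    ((PySem.List.pyRange a (pyIsqrt (n - 1) + 1) 1).filter (fun b => decide (a * a + b * b < n))).map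
      (fun b => a * a + b * b))

-- bridge predicate: a is the smaller leg of some representation of s
def pvQ (s a : Int) : Bool := decide (2 * (a * a) ≤ s) && (pyIsqrt (s - a * a) * pyIsqrt (s - a * a) == s - a * a)

-- the run-length-scan result on a sorted list, described run by run (fuel = list length)
def pvTgtF : Nat → List Int → List Int
  | _, [] => []
  | 0, _ :: _ => []
  | Nat.succ fuel, x :: t =>
    (if (1 + t.count x) == 2 then [x] else []) ++ pvTgtF fuel (t.filter (fun y => decide (y ≠ x)))

def pvTgt (l : List Int) : List Int := pvTgtF l.length l

theorem pvTgtF_nil (f : Nat) : pvTgtF f [] = [] := by cases f <;> rfl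

theorem pvTgtF_congr (fuel : Nat) : ∀ (fuel' : Nat) (l : List Int), l.length ≤ fuel → l.length ≤ fuel' →
    pvTgtF fuel l = pvTgtF fuel' l := by
  induction fuel with
  | zero =>
    intro fuel' l h _
    have : l = [] := List.eq_nil_of_length_eq_zero (by omega)
    subst this
    rw [pvTgtF_nil, pvTgtF_nil]
  | succ f ih =>
    intro fuel' l h h'
    cases l with
    | nil => rw [pvTgtF_nil, pvTgtF_nil]
    | cons x t =>
      cases fuel' with
      | zero => simp at h'
      | succ f' =>
        show _ ++ _ = _ ++ _
        congr 1
        exact ih f' _ (le_trans (List.length_filter_le _ _) (by simpa using h))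
          (le_trans (List.length_filter_le _ _) (by simpa using h'))

theorem pvTgt_nil : pvTgt [] = [] := rfl

theorem pvTgt_cons (x : Int) (t : List Int) :
    pvTgt (x :: t) = (if (1 + t.count x) == 2 then [x] else [])
      ++ pvTgt (t.filter (fun y => decide (y ≠ x))) := by
  show pvTgtF (t.length + 1) (x :: t) = _
  show _ ++ pvTgtF t.length (t.filter (fun y => decide (y ≠ x))) = _
  congr 1
  exact pvTgtF_congr _ _ _ (List.length_filter_le _ _) le_rfl

theorem pyIsqrt_nonneg (x : Int) : 0 ≤ pyIsqrt x := Int.natCast_nonneg _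

theorem le_pyIsqrt_iff (x b : Int) (hx : 0 ≤ x) (hb : 0 ≤ b) :
    b ≤ pyIsqrt x ↔ b * b ≤ x := by
  lift x to ℕ using hx; lift b to ℕ using hb
  unfold pyIsqrt
  rw [Int.toNat_natCast]
  constructor
  · intro h
    have : (b : ℕ) * b ≤ x := Nat.le_sqrt.mp (by exact_mod_cast h)
    exact_mod_cast this
  · intro h
    have : (b : ℕ) ≤ Nat.sqrt x := Nat.le_sqrt.mpr (by exact_mod_cast h)
    exact_mod_cast this

theorem pyIsqrt_mul_self (b : Int) (hb : 0 ≤ b) : pyIsqrt (b * b) = b := by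
  lift b to ℕ using hb
  unfold pyIsqrt
  rw [← Nat.cast_mul, Int.toNat_natCast, Nat.sqrt_eq]

theorem pvQ_iff (s a : Int) (ha : 0 ≤ a) :
    pvQ s a = true ↔ ∃ b, a ≤ b ∧ a * a + b * b = s := by
  unfold pvQ
  rw [Bool.and_eq_true, decide_eq_true_iff, beq_iff_eq]
  constructor
  · rintro ⟨h2, hq⟩
    refine ⟨pyIsqrt (s - a * a), ?_, by linarith⟩
    nlinarith [pyIsqrt_nonneg (s - a * a)]
  · rintro ⟨b, hab, hsum⟩
    have hb : 0 ≤ b := le_trans ha hab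
    have haabb : a * a ≤ b * b := mul_le_mul hab hab ha hb
    have hrw : s - a * a = b * b := by linarith
    refine ⟨by linarith, ?_⟩
    rw [hrw, pyIsqrt_mul_self b hb]

theorem sum_map_ite_one_zero_nat {α : Type} (l : List α) (p : α → Bool) :
    (l.map (fun a => if p a then (1 : Nat) else 0)).sum = l.countP p := by
  induction l with
  | nil => simp
  | cons a l ih =>
    cases h : p a
    · simp [h, ih]
    · simp [h, ih]; omega

theorem count_flatMap_nat {α : Type} (l : List α) (g : α → List Int) (s : Int) :
    ((l.flatMap g).count s) = (l.map (fun a => (g a).count s)).sum := by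
  induction l with
  | nil => simp
  | cons a l ih => simp [List.count_append, ih]

theorem inner_count (n s a : Int) (hsn : s < n) (hs0 : 0 ≤ s) (ha : 0 ≤ a) :
    ((PySem.List.pyRange a (pyIsqrt (n - 1 - a * a) + 1) 1).map (fun b => a * a + b * b)).count s
      = if pvQ s a then 1 else 0 := by
  have hnodup : ((PySem.List.pyRange a (pyIsqrt (n - 1 - a * a) + 1) 1).map (fun b => a * a + b * b)).Nodup := by
    apply List.Nodup.map_on _ (PySem.List.nodup_pyRange_one _ _)
    intro x hx y hy hxy
    have hx' := (PySem.List.mem_pyRange_one.mp hx).1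
    have hy' := (PySem.List.mem_pyRange_one.mp hy).1
    have : x * x = y * y := by linarith
    exact (mul_self_inj (le_trans ha hx') (le_trans ha hy')).mp this
  have hmem : s ∈ ((PySem.List.pyRange a (pyIsqrt (n - 1 - a * a) + 1) 1).map (fun b => a * a + b * b)) ↔ pvQ s a = true := by
    rw [List.mem_map]
    constructor
    · rintro ⟨b, hb, rfl⟩
      have h := PySem.List.mem_pyRange_one.mp hb
      exact (pvQ_iff _ a ha).mpr ⟨b, h.1, rfl⟩
    · intro hq
      obtain ⟨b, hab, hsum⟩ := (pvQ_iff s a ha).mp hq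
      have hb : 0 ≤ b := le_trans ha hab
      have hxnn : 0 ≤ n - 1 - a * a := by nlinarith
      have : b ≤ pyIsqrt (n - 1 - a * a) := (le_pyIsqrt_iff _ b hxnn hb).mpr (by nlinarith)
      exact ⟨b, PySem.List.mem_pyRange_one.mpr ⟨hab, by omega⟩, hsum⟩
  by_cases h : pvQ s a = true
  · rw [if_pos h]
    have hm := hmem.mpr h
    have h1 := List.nodup_iff_count_le_one.mp hnodup s
    have h2 := List.count_pos_iff.mpr hm
    omega
  · rw [if_neg h]
    exact List.count_eq_zero.mpr (fun hc => h (hmem.mp hc))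

-- B's inner list counts s the same way
theorem inner_countB (n s a : Int) (hsn : s < n) (hs0 : 0 ≤ s) (ha : 0 ≤ a) :
    (((PySem.List.pyRange a (pyIsqrt (n - 1) + 1) 1).filter (fun b => decide (a * a + b * b < n))).map
      (fun b => a * a + b * b)).count s = if pvQ s a then 1 else 0 := by
  have hnodup : (((PySem.List.pyRange a (pyIsqrt (n - 1) + 1) 1).filter (fun b => decide (a * a + b * b < n))).map
      (fun b => a * a + b * b)).Nodup := by
    apply List.Nodup.map_on _ (List.Nodup.filter _ (PySem.List.nodup_pyRange_one _ _))
    intro x hx y hy hxy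
    have hx' := (PySem.List.mem_pyRange_one.mp (List.mem_of_mem_filter hx)).1
    have hy' := (PySem.List.mem_pyRange_one.mp (List.mem_of_mem_filter hy)).1
    have : x * x = y * y := by linarith
    exact (mul_self_inj (le_trans ha hx') (le_trans ha hy')).mp this
  have hmem : s ∈ (((PySem.List.pyRange a (pyIsqrt (n - 1) + 1) 1).filter (fun b => decide (a * a + b * b < n))).map
      (fun b => a * a + b * b)) ↔ pvQ s a = true := by
    rw [List.mem_map]
    constructor
    · rintro ⟨b, hb, rfl⟩
      have h := PySem.List.mem_pyRange_one.mp (List.mem_of_mem_filter hb)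
      exact (pvQ_iff _ a ha).mpr ⟨b, h.1, rfl⟩
    · intro hq
      obtain ⟨b, hab, hsum⟩ := (pvQ_iff s a ha).mp hq
      have hb : 0 ≤ b := le_trans ha hab
      have hbb : b * b ≤ n - 1 := by nlinarith
      have hbm : b ≤ pyIsqrt (n - 1) := (le_pyIsqrt_iff _ b (by omega) hb).mpr hbb
      refine ⟨b, List.mem_filter.mpr ⟨PySem.List.mem_pyRange_one.mpr ⟨hab, by omega⟩, ?_⟩, hsum⟩
      exact decide_eq_true (by omega)
  by_cases h : pvQ s a = true
  · rw [if_pos h]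
    have hm := hmem.mpr h
    have h1 := List.nodup_iff_count_le_one.mp hnodup s
    have h2 := List.count_pos_iff.mpr hm
    omega
  · rw [if_neg h]
    exact List.count_eq_zero.mpr (fun hc => h (hmem.mp hc))

theorem count_pvSums (n s : Int) (hsn : s < n) (hs0 : 0 ≤ s) :
    (pvSums n).count s = (PySem.List.pyRange 0 (pyIsqrt (n - 1) + 1) 1).countP (pvQ s) := by
  unfold pvSums
  rw [count_flatMap_nat]
  rw [List.map_congr_left (fun a hmem => inner_count n s a hsn hs0 (PySem.List.mem_pyRange_one.mp hmem).1)]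
  exact sum_map_ite_one_zero_nat _ _

theorem count_pvSumsB (n s : Int) (hsn : s < n) (hs0 : 0 ≤ s) :
    (pvSumsB n).count s = (PySem.List.pyRange 0 (pyIsqrt (n - 1) + 1) 1).countP (pvQ s) := by
  unfold pvSumsB
  rw [count_flatMap_nat]
  rw [List.map_congr_left (fun a hmem => inner_countB n s a hsn hs0 (PySem.List.mem_pyRange_one.mp hmem).1)]
  exact sum_map_ite_one_zero_nat _ _

theorem mem_pvSums_bounds (n s : Int) (hn : 1 < n) (h : s ∈ pvSums n) : 0 ≤ s ∧ s < n := by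
  unfold pvSums at h
  rw [List.mem_flatMap] at h
  obtain ⟨a, hamem, hs⟩ := h
  rw [List.mem_map] at hs
  obtain ⟨b, hbmem, rfl⟩ := hs
  have ha := PySem.List.mem_pyRange_one.mp hamem
  have hb := PySem.List.mem_pyRange_one.mp hbmem
  have ha0 : 0 ≤ a := ha.1
  have hb0 : 0 ≤ b := le_trans ha0 hb.1
  have ham : a ≤ pyIsqrt (n - 1) := by omega
  have haa : a * a ≤ n - 1 := (le_pyIsqrt_iff _ a (by omega) ha0).mp ham
  have hbm : b ≤ pyIsqrt (n - 1 - a * a) := by omega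
  have hbb : b * b ≤ n - 1 - a * a := (le_pyIsqrt_iff _ b (by nlinarith [mul_nonneg ha0 ha0]) hb0).mp hbm
  constructor
  · nlinarith
  · nlinarith

theorem mem_pvSumsB_bounds (n s : Int) (h : s ∈ pvSumsB n) : 0 ≤ s ∧ s < n := by
  unfold pvSumsB at h
  rw [List.mem_flatMap] at h
  obtain ⟨a, hamem, hs⟩ := h
  rw [List.mem_map] at hs
  obtain ⟨b, hbmem, rfl⟩ := hs
  have ha := PySem.List.mem_pyRange_one.mp hamem
  have hb := PySem.List.mem_pyRange_one.mp (List.mem_of_mem_filter hbmem)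
  have hguard : a * a + b * b < n := by
    have := (List.mem_filter.mp hbmem).2
    simpa using this
  have ha0 : 0 ≤ a := ha.1
  have hb0 : 0 ≤ b := le_trans ha0 hb.1
  exact ⟨by positivity, hguard⟩

-- the scan, run by run: from state (res, some v, k) on a sorted tail whose elements are ≥ v
theorem fold_run (l : List Int) (res : List Int) (v k : Int)
    (hl : l.Pairwise (· ≤ ·)) (hv : ∀ y ∈ l, v ≤ y) :
    (let st := l.foldl pvStep (res, some v, k)
     if st.2.2 == 2 then st.1 ++ [st.2.1.getD 0] else st.1)
      = (if (k + (l.count v : Int)) == 2 then res ++ [v] else res)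
        ++ pvTgt (l.filter (fun y => decide (y ≠ v))) := by
  induction l generalizing res v k with
  | nil => simp [pvTgt_nil]
  | cons x t ih =>
    have hxt : ∀ y ∈ t, x ≤ y := fun y hy => List.rel_of_pairwise_cons hl hy
    have ht : t.Pairwise (· ≤ ·) := hl.of_cons
    by_cases hxv : x = v
    · subst hxv
      have hstep : pvStep (res, some x, k) x = (res, some x, k + 1) := by
        simp [pvStep]
      rw [List.foldl_cons, hstep, ih res x (k + 1) ht hxt]
      have hf : (x :: t).filter (fun y => decide (y ≠ x)) = t.filter (fun y => decide (y ≠ x)) := by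
        simp
      rw [hf, List.count_cons_self]
      have hc : (k + ((t.count x + 1 : Nat) : Int)) = (k + 1 + (t.count x : Int)) := by
        push_cast; ring
      rw [hc]
    · have hvx : v < x := lt_of_le_of_ne (hv x List.mem_cons_self) (fun h => hxv h.symm)
      have hstep : pvStep (res, some v, k) x
          = ((if k == 2 then res ++ [(some v).getD 0] else res), some x, 1) := by
        simp [pvStep, hxv]
      have hcv : t.count v = 0 :=
        List.count_eq_zero.mpr (fun hmem => absurd (hxt v hmem) (not_le.mpr hvx))
      have hcv' : (x :: t).count v = 0 := by
        rw [List.count_cons_of_ne (fun h => hxv h) , hcv]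
      have hfv : (x :: t).filter (fun y => decide (y ≠ v)) = x :: t := by
        apply List.filter_eq_self.mpr
        intro y hy
        rcases List.mem_cons.mp hy with rfl | hyt
        · exact decide_eq_true hxv
        · have hxy : x ≤ y := hxt y hyt
          exact decide_eq_true (fun h => by subst h; omega)
      rw [List.foldl_cons, hstep,
        ih (if k == 2 then res ++ [(some v).getD 0] else res) x 1 ht hxt, hfv]
      show _ = (if (k + ((x :: t).count v : Int)) == 2 then res ++ [v] else res) ++ pvTgt (x :: t)
      rw [hcv']
      rw [pvTgt_cons]
      have hk2 : ((k + ((0 : Nat) : Int)) == 2) = (k == 2) := by norm_num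
      rw [hk2]
      have hcnt : ((1 : Int) + (t.count x : Int) == 2) = ((1 + t.count x) == 2) := by
        rcases eq_or_ne (t.count x) 1 with h | h
        · rw [h]; decide
        · have h1 : ¬ ((1 : Int) + (t.count x : Int) = 2) := by omega
          have h2 : ¬ (1 + t.count x = 2) := by omega
          rw [beq_eq_false_iff_ne.mpr h1, beq_eq_false_iff_ne.mpr h2]
      rw [hcnt]
      by_cases hk : (k == 2) = true
      · rw [if_pos hk, if_pos hk]
        by_cases hc : ((1 + t.count x) == 2) = true
        · rw [if_pos hc, if_pos hc]; simp
        · rw [if_neg hc, if_neg hc]; simp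
      · rw [if_neg hk, if_neg hk]
        by_cases hc : ((1 + t.count x) == 2) = true
        · rw [if_pos hc, if_pos hc]; simp
        · rw [if_neg hc, if_neg hc]; simp

-- starting from the empty state, the scan computes pvTgt of a sorted list
theorem scan_eq_pvTgt (l : List Int) (hl : l.Pairwise (· ≤ ·)) :
    (let st := l.foldl pvStep ([], none, 0)
     if st.2.2 == 2 then st.1 ++ [st.2.1.getD 0] else st.1) = pvTgt l := by
  cases l with
  | nil => simp [pvTgt_nil]
  | cons x t =>
    have hstep : pvStep (([] : List Int), (none : Option Int), (0 : Int)) x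
        = (([] : List Int), some x, 1) := by
      simp [pvStep]
    show (let st := (x :: t).foldl pvStep ([], none, 0)
      if st.2.2 == 2 then st.1 ++ [st.2.1.getD 0] else st.1) = pvTgt (x :: t)
    rw [show (x :: t).foldl pvStep ([], none, 0) = t.foldl pvStep ([], some x, 1) from by
      rw [List.foldl_cons, hstep]]
    have := fold_run t [] x 1 hl.of_cons (fun y hy => List.rel_of_pairwise_cons hl hy)
    simp only at this ⊢
    rw [this, pvTgt_cons]
    have hcnt : ((1 : Int) + (t.count x : Int) == 2) = ((1 + t.count x) == 2) := by
      rcases eq_or_ne (t.count x) 1 with h | h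
      · rw [h]; decide
      · have h1 : ¬ ((1 : Int) + (t.count x : Int) = 2) := by omega
        have h2 : ¬ (1 + t.count x = 2) := by omega
        rw [beq_eq_false_iff_ne.mpr h1, beq_eq_false_iff_ne.mpr h2]
    rw [hcnt]
    by_cases hc : ((1 + t.count x) == 2) = true
    · simp [hc]
    · simp [hc]

-- membership in pvTgt of a sorted list: exactly the elements occurring twice
theorem mem_pvTgt_aux (fuel : Nat) : ∀ (l : List Int), l.length ≤ fuel → l.Pairwise (· ≤ ·) → ∀ (s : Int),
    (s ∈ pvTgt l ↔ s ∈ l ∧ l.count s = 2) := by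
  induction fuel with
  | zero =>
    intro l h _ s
    have : l = [] := List.eq_nil_of_length_eq_zero (by omega)
    subst this
    simp [pvTgt_nil]
  | succ f ihf =>
    intro l hlen hl s
    cases l with
    | nil => simp [pvTgt_nil]
    | cons x t =>
    have hxt : ∀ y ∈ t, x ≤ y := fun y hy => List.rel_of_pairwise_cons hl hy
    have ht : (t.filter (fun y => decide (y ≠ x))).Pairwise (· ≤ ·) := (hl.of_cons).filter _
    have ih := ihf (t.filter (fun y => decide (y ≠ x)))
      (le_trans (List.length_filter_le _ _) (by simpa using hlen)) ht s
    rw [pvTgt_cons, List.mem_append, ih]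
    have hcf : ∀ y : Int, y ≠ x → (t.filter (fun y => decide (y ≠ x))).count y = t.count y := by
      intro y hy
      rw [List.count_filter (by simpa using hy)]
    constructor
    · rintro (hmem | ⟨hmemf, hcnt⟩)
      · have hx : s = x := by
          by_cases hc : ((1 + t.count x) == 2) = true
          · rw [if_pos hc] at hmem; simpa using hmem
          · rw [if_neg hc] at hmem; simp at hmem
        subst hx
        have hc : (1 + t.count s) == 2 := by
          by_contra hc
          rw [if_neg hc] at hmem; simp at hmem
        refine ⟨List.mem_cons_self, ?_⟩
        rw [List.count_cons_self]
        have := beq_iff_eq.mp hc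
        omega
      · have hsx : s ≠ x := by
          have := (List.mem_filter.mp hmemf).2
          simpa using this
        refine ⟨List.mem_cons_of_mem _ (List.mem_of_mem_filter hmemf), ?_⟩
        have h := hcf s hsx
        have hcc : (x :: t).count s = t.count s := by
          simp [Ne.symm hsx]
        rw [hcc]
        omega
    · rintro ⟨hmem, hcnt⟩
      by_cases hsx : s = x
      · subst hsx
        left
        rw [List.count_cons_self] at hcnt
        have : ((1 + t.count s) == 2) = true := beq_iff_eq.mpr (by omega)
        rw [if_pos this]
        simp
      · right
        have hmt : s ∈ t := by
          rcases List.mem_cons.mp hmem with rfl | h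
          · exact absurd rfl hsx
          · exact h
        refine ⟨List.mem_filter.mpr ⟨hmt, decide_eq_true hsx⟩, ?_⟩
        have h := hcf s hsx
        have hcc : (x :: t).count s = t.count s := by
          simp [Ne.symm hsx]
        rw [hcc] at hcnt
        omega

-- pvTgt of a sorted list is strictly increasing
theorem mem_pvTgt (l : List Int) (hl : l.Pairwise (· ≤ ·)) (s : Int) :
    s ∈ pvTgt l ↔ s ∈ l ∧ l.count s = 2 :=
  mem_pvTgt_aux l.length l le_rfl hl s

theorem pairwise_lt_pvTgt_aux (fuel : Nat) : ∀ (l : List Int), l.length ≤ fuel → l.Pairwise (· ≤ ·) →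
    (pvTgt l).Pairwise (· < ·) := by
  induction fuel with
  | zero =>
    intro l h _
    have : l = [] := List.eq_nil_of_length_eq_zero (by omega)
    subst this
    simp [pvTgt_nil]
  | succ f ihf =>
    intro l hlen hl
    cases l with
    | nil => simp [pvTgt_nil]
    | cons x t =>
    have hxt : ∀ y ∈ t, x ≤ y := fun y hy => List.rel_of_pairwise_cons hl hy
    have ht : (t.filter (fun y => decide (y ≠ x))).Pairwise (· ≤ ·) := (hl.of_cons).filter _
    have ihr := ihf (t.filter (fun y => decide (y ≠ x)))
      (le_trans (List.length_filter_le _ _) (by simpa using hlen)) ht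
    have hgt : ∀ y ∈ pvTgt (t.filter (fun y => decide (y ≠ x))), x < y := by
      intro y hy
      have hmem := ((mem_pvTgt _ ht y).mp hy).1
      have h1 : y ∈ t := List.mem_of_mem_filter hmem
      have h2 : y ≠ x := by
        have := (List.mem_filter.mp hmem).2
        simpa using this
      exact lt_of_le_of_ne (hxt y h1) (fun h => h2 h.symm)
    rw [pvTgt_cons]
    by_cases hc : ((1 + t.count x) == 2) = true
    · rw [if_pos hc]
      exact List.pairwise_cons.mpr ⟨hgt, ihr⟩
    · rw [if_neg hc]
      exact ihr

theorem pairwise_lt_pvTgt (l : List Int) (hl : l.Pairwise (· ≤ ·)) :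
    (pvTgt l).Pairwise (· < ·) :=
  pairwise_lt_pvTgt_aux l.length l le_rfl hl

-- A is the sorted filtered key set of the counter of pvSums
theorem a_eq_sorted (n : Int) (hn : ¬ n ≤ 1) :
    sums_of_two_squares_exactly_two_ways n =
      PySem.List.sorted ((PySem.Set.ofList (pvSums n)).filter
        (fun k => ((pvSums n).count k : Int) == 2)) (fun x => x) false := by
  unfold sums_of_two_squares_exactly_two_ways
  rw [if_neg hn]
  have hfold : (PySem.List.pyRange 0 (pyIsqrt (n - 1) + 1) 1).foldl (fun d a =>
        (PySem.List.pyRange a (pyIsqrt (n - 1 - a * a) + 1) 1).foldl (fun d b =>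
          d.modify (a * a + b * b) 0 (· + 1)) d) PySem.Dict.empty
      = PySem.Dict.counter (pvSums n) := by
    rw [PySem.Dict.counter_eq_foldl]
    unfold pvSums
    rw [List.flatMap_def, List.foldl_flatten, List.foldl_map]
    apply PySem.List.foldl_congr_mem
    intro d a _
    rw [List.foldl_map]
  simp only [hfold, PySem.Dict.items_counter, List.filter_map, List.map_map]
  congr 1
  · simp [Function.comp_def]

theorem final_eq (n : Int) :
    sums_of_two_squares_exactly_two_ways n = sums_of_two_squares_exactly_two_ways_alt n := by
  by_cases hn : n ≤ 1
  · rw [sums_of_two_squares_exactly_two_ways, if_pos hn]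
    by_cases hn0 : n ≤ 0
    · rw [sums_of_two_squares_exactly_two_ways_alt, if_pos hn0]
    · have : n = 1 := by omega
      subst this
      decide
  · have hn' : 1 < n := by omega
    rw [a_eq_sorted n hn]
    have hsorted : (PySem.List.sorted (pvSumsB n) (fun x => x) false).Pairwise (· ≤ ·) :=
      PySem.List.sorted_pairwise _ _
    have halt : sums_of_two_squares_exactly_two_ways_alt n
        = (let st := (PySem.List.sorted (pvSumsB n) (fun x => x) false).foldl pvStep ([], none, 0)
           if st.2.2 == 2 then st.1 ++ [st.2.1.getD 0] else st.1) := by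
      unfold sums_of_two_squares_exactly_two_ways_alt pvSumsB
      rw [if_neg (by omega)]
    rw [halt, scan_eq_pvTgt _ hsorted]
    apply PySem.List.sorted_eq_of_perm_of_pairwise_lt
    · have hperm := PySem.List.sorted_perm (pvSumsB n) (fun x => x) false
      rw [List.perm_ext_iff_of_nodup
        ((pairwise_lt_pvTgt _ hsorted).nodup)
        (List.Nodup.filter _ (PySem.Set.nodup_ofList _))]
      intro s
      rw [mem_pvTgt _ hsorted s, List.mem_filter, PySem.Set.mem_ofList]
      rw [hperm.mem_iff, hperm.count_eq]
      constructor
      · rintro ⟨hmem, hcnt⟩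
        obtain ⟨hs0, hsn⟩ := mem_pvSumsB_bounds n s hmem
        have h1 := count_pvSumsB n s hsn hs0
        have h2 := count_pvSums n s hsn hs0
        refine ⟨List.count_pos_iff.mp (by omega), by rw [beq_iff_eq]; omega⟩
      · rintro ⟨hmem, hc⟩
        rw [beq_iff_eq] at hc
        obtain ⟨hs0, hsn⟩ := mem_pvSums_bounds n s hn' hmem
        have h1 := count_pvSumsB n s hsn hs0
        have h2 := count_pvSums n s hsn hs0
        have hcnt2 : (pvSumsB n).count s = 2 := by omega
        exact ⟨List.count_pos_iff.mp (by omega), hcnt2⟩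
    · exact pairwise_lt_pvTgt _ hsorted

-- ===== VERDICT (by name: the statement is the Claim_ definition above) =====
theorem sums_of_two_squares_exactly_two_ways_spec : Claim_equal_sums_of_two_squares_exactly_two_ways := by
  intro n _
  exact final_eq n
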